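-- pv_equiv track=rewrite | github.com/SheetMetalConnect/eryxon-flow | services/eryxon3d/step_parser.py | _normalize_step_content
-- ===== SOURCE A (Python) =====
-- def _normalize_step_content(content: str) -> str:
--     """
--     Normalize STEP content by handling multi-line entities.
--
--     Preserves string literals while normalizing other whitespace.
--     """
--     # Replace newlines with spaces (entities can span multiple lines)
--     # but preserve strings
--     result = []
--     in_string = False
--     i = 0
--     while i < len(content):
--         char = content[i]
--         if char == "'" and (i == 0 or content[i-1] != '\\'):
--             in_string = not in_string
--             result.append(char)
--         elif char in '\n\r' and not in_string:
--             result.append(' ')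
--         else:
--             result.append(char)
--         i += 1
--
--     # Collapse multiple spaces (outside strings)
--     normalized = ''.join(result)
--     # Collapse whitespace outside strings
--     final = []
--     in_string = False
--     prev_space = False
--     for char in normalized:
--         if char == "'":
--             in_string = not in_string
--             final.append(char)
--             prev_space = False
--         elif char == ' ' and not in_string:
--             if not prev_space:
--                 final.append(char)
--             prev_space = True
--         else:
--             final.append(char)
--             prev_space = False
--
--     return ''.join(final)
-- ===== SOURCE B (Python) =====
-- def _normalize_step_content(content: str) -> str:
--     """Single-pass fusion of A's two passes over the content.
--
--     Two string-state flags are tracked because A's passes disagree about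
--     quoting: pass 1 is escape-aware (a backslash-preceded quote does not
--     toggle), pass 2 toggles on every quote.
--     """
--     out = []
--     in_esc = False      # escape-aware string state (governs newline -> space)
--     in_naive = False    # naive string state (governs space collapsing)
--     prev_space = False
--     prev_bs = False     # previous original char was a backslash
--     for ch in content:
--         c = ' ' if (ch in '\n\r' and not in_esc) else ch
--         if ch == "'" and not prev_bs:
--             in_esc = not in_esc
--         prev_bs = ch == '\\'
--         if c == "'":
--             in_naive = not in_naive
--             out.append(c)
--             prev_space = False
--         elif c == ' ' and not in_naive:
--             if not prev_space:
--                 out.append(c)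
--             prev_space = True
--         else:
--             out.append(c)
--             prev_space = False
--     return ''.join(out)
-- ===== Notes on version B (the rewrite author's own statement) =====
-- stated objective: faster
-- what changed: Fuses A's two sequential passes (newline replacement with an intermediate list+join, then space collapsing) into one single-pass state machine over the original string that tracks both the escape-aware and the naive string flags at once.
import Mathlib
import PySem

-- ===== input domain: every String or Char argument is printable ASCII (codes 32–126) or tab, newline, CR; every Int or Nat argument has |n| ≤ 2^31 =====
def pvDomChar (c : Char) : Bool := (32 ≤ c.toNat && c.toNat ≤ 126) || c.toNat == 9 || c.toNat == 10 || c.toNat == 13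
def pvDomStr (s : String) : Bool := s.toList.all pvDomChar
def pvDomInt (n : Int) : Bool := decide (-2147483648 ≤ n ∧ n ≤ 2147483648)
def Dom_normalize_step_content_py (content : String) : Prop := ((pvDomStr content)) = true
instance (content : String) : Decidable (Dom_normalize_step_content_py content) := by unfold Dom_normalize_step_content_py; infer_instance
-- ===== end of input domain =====

-- B fuses A's two passes into one single-pass state machine (one traversal, no
-- intermediate string); proved to return the same string on every input.

-- ===== PORT A =====
-- pass 1 of A: the while-loop (prev = content[i-1] as an Option, none at i = 0)
def pvA1 (l : List Char) (prev : Option Char) (inString : Bool) : List Char :=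
  match l with
  | [] => []
  | c :: rest =>
    if c = '\'' ∧ prev ≠ some '\\' then
      c :: pvA1 rest (some c) (!inString)
    else if (c = '\n' ∨ c = '\r') ∧ inString = false then
      ' ' :: pvA1 rest (some c) inString
    else
      c :: pvA1 rest (some c) inString

-- pass 2 of A: the for-loop collapsing spaces with a naive quote toggle
def pvA2 (l : List Char) (inString prevSpace : Bool) : List Char :=
  match l with
  | [] => []
  | c :: rest =>
    if c = '\'' then
      c :: pvA2 rest (!inString) false
    else if c = ' ' ∧ inString = false then
      (if prevSpace = false then [' '] else []) ++ pvA2 rest inString true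
    else
      c :: pvA2 rest inString false

def normalize_step_content_py (content : String) : String :=
  String.mk (pvA2 (pvA1 content.toList none false) false false)

-- ===== PORT B =====
-- B's single loop: four booleans of state, emits directly
def pvB (l : List Char) (prevBS inEsc inNaive prevSpace : Bool) : List Char :=
  match l with
  | [] => []
  | ch :: rest =>
    let c := if (ch = '\n' ∨ ch = '\r') ∧ inEsc = false then ' ' else ch
    let inEsc' := if ch = '\'' ∧ prevBS = false then !inEsc else inEsc
    let pbs : Bool := decide (ch = '\\')
    if c = '\'' then
      c :: pvB rest pbs inEsc' (!inNaive) false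
    else if c = ' ' ∧ inNaive = false then
      (if prevSpace = false then [' '] else []) ++ pvB rest pbs inEsc' inNaive true
    else
      c :: pvB rest pbs inEsc' inNaive false

def normalize_step_content_py_alt (content : String) : String :=
  String.mk (pvB content.toList false false false false)

-- ===== PRECONDITION & SPEC =====
def Spec_normalize_step_content_py (content : String) (out : String) : Prop := out = normalize_step_content_py_alt content
instance (content : String) (out : String) : Decidable (Spec_normalize_step_content_py content out) := by unfold Spec_normalize_step_content_py; infer_instance

-- ===== CLAIM (what is proved, stated in full; the proofs are below) =====
def Claim_equal_normalize_step_content_py : Prop := ∀ (content : String), Dom_normalize_step_content_py content → Spec_normalize_step_content_py content (normalize_step_content_py content)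

-- ===== LEMMAS AND PROOFS =====

-- fusing A's pass 2 ∘ pass 1 into B's single loop
theorem pvFuse (l : List Char) : ∀ (prev : Option Char) (inEsc inNaive prevSpace : Bool),
    pvA2 (pvA1 l prev inEsc) inNaive prevSpace
      = pvB l (decide (prev = some '\\')) inEsc inNaive prevSpace := by
  induction l with
  | nil => intro prev inEsc inNaive prevSpace; rfl
  | cons c rest ih =>
    intro prev inEsc inNaive prevSpace
    simp only [pvA1, pvB]
    by_cases hq : c = '\''
    · subst hq
      by_cases hp : prev = some '\\' <;>
        simp [hp, pvA2, ih]
    · by_cases hn : (c = '\n' ∨ c = '\r') ∧ inEsc = false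
      · have hc : c ≠ '\'' := hq
        simp only [if_pos hn]
        simp [pvA2, hn, ih, hq]
      · simp only [if_neg hn]
        simp [pvA2, hq, ih]

-- ===== VERDICT (by name: the statement is the Claim_ definition above) =====
theorem normalize_step_content_py_spec : Claim_equal_normalize_step_content_py := by
  intro content _
  unfold Spec_normalize_step_content_py normalize_step_content_py normalize_step_content_py_alt
  rw [pvFuse]
  rfl
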